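-- pv_equiv track=rewrite | github.com/deislasc/pipeenlinea | mysite/main.py | deleteCheckBoxes
-- ===== SOURCE A (Python) =====
-- def deleteCheckBoxes(data):
--     checkBoxes=[]
--     for field in data:
--         if "check_" in field:
--             checkBoxes.append(field)
--     for field in checkBoxes:
--         del data[field]
--     return data
-- ===== SOURCE B (Python) =====
-- def deleteCheckBoxes(data):
--     kept = {k: v for k, v in data.items() if "check_" not in k}
--     data.clear()
--     data.update(kept)
--     return data
-- ===== Notes on version B (the rewrite author's own statement) =====
-- stated objective: simpler
-- what changed: B filters the survivors in one comprehension and rewrites the dict in place (clear+update), instead of collecting the matching keys in a list and deleting them one by one.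
import Mathlib
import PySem

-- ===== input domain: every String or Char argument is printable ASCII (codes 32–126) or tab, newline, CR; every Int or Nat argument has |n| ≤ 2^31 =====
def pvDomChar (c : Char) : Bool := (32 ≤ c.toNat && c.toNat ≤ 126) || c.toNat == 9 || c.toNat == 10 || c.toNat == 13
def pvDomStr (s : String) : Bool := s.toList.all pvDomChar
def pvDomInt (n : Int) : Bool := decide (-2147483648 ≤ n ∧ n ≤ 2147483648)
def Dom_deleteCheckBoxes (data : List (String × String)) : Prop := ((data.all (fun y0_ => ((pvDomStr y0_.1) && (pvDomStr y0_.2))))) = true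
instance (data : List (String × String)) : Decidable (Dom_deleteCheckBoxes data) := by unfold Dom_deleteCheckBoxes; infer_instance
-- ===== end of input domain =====

-- B rewrites the dict in place from a one-pass survivor comprehension instead of
-- collecting the matching keys and deleting them one by one (objective: simpler).
-- A mutates its argument in place (so does B, via clear+update); the equivalence
-- proved here is about the returned value.

-- ===== PORT A =====
-- 'checkBoxes.append(field)' loop over the dict's keys
def pvCheckBoxesOf (data : List (String × String)) : List String :=
  data.foldl (fun acc p => if PySem.Str.isIn "check_" p.1 then acc ++ [p.1] else acc) []

def deleteCheckBoxes (data : List (String × String)) : List (String × String) :=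
  -- 'for field in checkBoxes: del data[field]' — each del removes that key's entry
  (pvCheckBoxesOf data).foldl (fun d k => d.filter (fun p => !(p.1 == k))) data

-- ===== PORT B =====
def deleteCheckBoxes_alt (data : List (String × String)) : List (String × String) :=
  -- kept = {k: v for k, v in data.items() if "check_" not in k}; clear+update keeps exactly kept
  data.filter (fun p => !(PySem.Str.isIn "check_" p.1))

-- ===== PRECONDITION & SPEC =====
def Spec_deleteCheckBoxes (data : List (String × String)) (out : List (String × String)) : Prop := out = deleteCheckBoxes_alt data
instance (data : List (String × String)) (out : List (String × String)) : Decidable (Spec_deleteCheckBoxes data out) := by unfold Spec_deleteCheckBoxes; infer_instance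

-- ===== CLAIM (what is proved, stated in full; the proofs are below) =====
def Claim_equal_deleteCheckBoxes : Prop := ∀ (data : List (String × String)), Dom_deleteCheckBoxes data → Spec_deleteCheckBoxes data (deleteCheckBoxes data)

-- ===== LEMMAS AND PROOFS =====

-- a fold of key-deletions is one filter against the whole key list
lemma foldl_filter_eq_filter_not_mem (ks : List String) (d : List (String × String)) :
    ks.foldl (fun d k => d.filter (fun p => !(p.1 == k))) d
      = d.filter (fun p => !(ks.contains p.1)) := by
  induction ks generalizing d with
  | nil => simp
  | cons k ks ih =>
      simp only [List.foldl_cons, ih, List.filter_filter]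
      apply List.filter_congr
      intro p _
      by_cases hpk : p.1 = k
      · simp [hpk]
      · simp [hpk, Ne.symm hpk]

lemma mem_pvCheckBoxesOf (data : List (String × String)) (k : String) :
    k ∈ pvCheckBoxesOf data ↔ ∃ p ∈ data, p.1 = k ∧ PySem.Str.isIn "check_" k = true := by
  unfold pvCheckBoxesOf
  rw [PySem.List.foldl_append_if]
  simp only [List.nil_append, List.mem_map, List.mem_filter]
  constructor
  · rintro ⟨p, ⟨hp, hm⟩, rfl⟩; exact ⟨p, hp, rfl, hm⟩
  · rintro ⟨p, hp, rfl, hm⟩; exact ⟨p, ⟨hp, hm⟩, rfl⟩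

-- ===== VERDICT (by name: the statement is the Claim_ definition above) =====
theorem deleteCheckBoxes_spec : Claim_equal_deleteCheckBoxes := by
  intro data _
  unfold Spec_deleteCheckBoxes deleteCheckBoxes deleteCheckBoxes_alt
  rw [foldl_filter_eq_filter_not_mem]
  apply List.filter_congr
  intro p hp
  have h := mem_pvCheckBoxesOf data p.1
  by_cases hm : PySem.Str.isIn "check_" p.1 = true
  · have hk := h.mpr ⟨p, hp, rfl, hm⟩
    simp only [PySem.Str.isIn_eq] at hm
    simp [hk]
    exact hm
  · simp only [Bool.not_eq_true] at hm
    have hnk : p.1 ∉ pvCheckBoxesOf data := fun hk => by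
      obtain ⟨q, _, _, hq⟩ := h.mp hk
      rw [hq] at hm; exact Bool.noConfusion hm
    simp only [PySem.Str.isIn_eq] at hm
    simp [hnk]
    exact hm
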